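-- pv_equiv track=rewrite | github.com/HamadAlrashid/HamadAlrashid | Sentencepiece/benchmark_pyserini.py | get_lang
-- ===== SOURCE A (Python) =====
-- languages = [
--     ['ar', 'arabic'],
--     ['bn', 'bengali'],
--     ['en', 'english'],
--     ['es', 'spanish'],
--     ['fa', 'persian'],
--     ['fi', 'finnish'],
--     ['fr', 'french'],
--     ['hi', 'hindi'],
--     ['id', 'indonesian'],
--     ['ja', 'japanese'],
--     ['ko', 'korean'],
--     ['ru', 'russian'],
--     ['sw', 'swahili'],
--     ['te', 'telugu'],
--     ['th', 'thai'],
--     ['zh', 'chinese'],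
--     ['de', 'german'],
--     ['yo', 'yoruba']
-- ]
--
-- def get_lang(language):
--
--     '''
--     returns either the id or the name of the given language
--
--     '''
--     for l in languages:
--         if language.lower() in l:
--
--             # Return name given ID
--             if len(language) == 2:
--                 return l[1]
--             else:
--                 # Return ID given name
--                 return l[0]
--
--
--     return None
-- ===== SOURCE B (Python) =====
-- # Single precomputed bidirectional lookup table written out once (id -> name and
-- # name -> id), so get_lang is one dict.get on the lowercased input: no scan over
-- # the language list and no len()==2 branch at call time.  Correct because all
-- # ids are 2 chars, all names longer, no id equals a name, and lower() preserves
-- # length, so the stored "other" element is always the intended answer.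
-- _LOOKUP = {
--     'ar': 'arabic', 'arabic': 'ar',
--     'bn': 'bengali', 'bengali': 'bn',
--     'en': 'english', 'english': 'en',
--     'es': 'spanish', 'spanish': 'es',
--     'fa': 'persian', 'persian': 'fa',
--     'fi': 'finnish', 'finnish': 'fi',
--     'fr': 'french', 'french': 'fr',
--     'hi': 'hindi', 'hindi': 'hi',
--     'id': 'indonesian', 'indonesian': 'id',
--     'ja': 'japanese', 'japanese': 'ja',
--     'ko': 'korean', 'korean': 'ko',
--     'ru': 'russian', 'russian': 'ru',
--     'sw': 'swahili', 'swahili': 'sw',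
--     'te': 'telugu', 'telugu': 'te',
--     'th': 'thai', 'thai': 'th',
--     'zh': 'chinese', 'chinese': 'zh',
--     'de': 'german', 'german': 'de',
--     'yo': 'yoruba', 'yoruba': 'yo',
-- }
--
--
-- def get_lang(language):
--     '''
--     returns either the id or the name of the given language
--     '''
--     return _LOOKUP.get(language.lower())
-- ===== Notes on version B (the rewrite author's own statement) =====
-- stated objective: simpler
-- what changed: Eliminates the per-call scan over the language list and its len(language)==2 branch: a single bidirectional lookup table (id->name and name->id) is written out once, and get_lang is one dict.get on the lowercased input.
import Mathlib
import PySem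

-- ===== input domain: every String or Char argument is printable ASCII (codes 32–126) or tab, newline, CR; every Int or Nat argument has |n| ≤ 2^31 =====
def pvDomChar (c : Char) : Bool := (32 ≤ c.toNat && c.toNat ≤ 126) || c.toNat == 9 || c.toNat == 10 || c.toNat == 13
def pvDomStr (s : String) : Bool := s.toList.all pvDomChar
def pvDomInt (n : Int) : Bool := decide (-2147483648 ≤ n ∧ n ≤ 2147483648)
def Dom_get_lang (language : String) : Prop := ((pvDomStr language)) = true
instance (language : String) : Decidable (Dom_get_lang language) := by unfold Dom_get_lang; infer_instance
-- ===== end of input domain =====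

-- B replaces A's per-call scan with its len(language)==2 branch by a single
-- precomputed bidirectional lookup table (id->name and name->id), one get per call (simpler).


-- ===== PORT A =====
-- the module-level `languages` table (pairs [id, name])
def pvLangs : List (String × String) :=
  [("ar","arabic"),("bn","bengali"),("en","english"),("es","spanish"),
   ("fa","persian"),("fi","finnish"),("fr","french"),("hi","hindi"),
   ("id","indonesian"),("ja","japanese"),("ko","korean"),("ru","russian"),
   ("sw","swahili"),("te","telugu"),("th","thai"),("zh","chinese"),
   ("de","german"),("yo","yoruba")]

-- A's for-loop over `languages`: membership test `language.lower() in l`,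
-- then the len(language) == 2 branch picks the name or the id.
def pvLoopA (low : String) (n : Int) : List (String × String) → Option String
  | [] => none
  | (i, nm) :: rest =>
      if low == i || low == nm then
        (if n == 2 then some nm else some i)
      else pvLoopA low n rest

def get_lang (language : String) : Option String :=
  pvLoopA (PySem.Str.lower language) (PySem.Str.len language) pvLangs

-- ===== PORT B =====
-- Source B's `_LOOKUP`: the bidirectional table written out as one literal dict
def pvLookup : PySem.Dict String String := PySem.Dict.ofList
  [("ar","arabic"),("arabic","ar"),
   ("bn","bengali"),("bengali","bn"),
   ("en","english"),("english","en"),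
   ("es","spanish"),("spanish","es"),
   ("fa","persian"),("persian","fa"),
   ("fi","finnish"),("finnish","fi"),
   ("fr","french"),("french","fr"),
   ("hi","hindi"),("hindi","hi"),
   ("id","indonesian"),("indonesian","id"),
   ("ja","japanese"),("japanese","ja"),
   ("ko","korean"),("korean","ko"),
   ("ru","russian"),("russian","ru"),
   ("sw","swahili"),("swahili","sw"),
   ("te","telugu"),("telugu","te"),
   ("th","thai"),("thai","th"),
   ("zh","chinese"),("chinese","zh"),
   ("de","german"),("german","de"),
   ("yo","yoruba"),("yoruba","yo")]

def get_lang_alt (language : String) : Option String :=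
  pvLookup.get? (PySem.Str.lower language)

-- ===== PRECONDITION & SPEC =====
def Spec_get_lang (language : String) (out : Option String) : Prop := out = get_lang_alt language
instance (language : String) (out : Option String) : Decidable (Spec_get_lang language out) := by unfold Spec_get_lang; infer_instance

-- ===== CLAIM (what is proved, stated in full; the proofs are below) =====
def Claim_equal_get_lang : Prop := ∀ (language : String), Dom_get_lang language → Spec_get_lang language (get_lang language)

-- ===== LEMMAS AND PROOFS =====

-- the bidirectional association list B's literal table holds, generated from A's pairs
def pvBidir : List (String × String) → List (String × String)
  | [] => []
  | (i, nm) :: rest => (i, nm) :: (nm, i) :: pvBidir rest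

set_option maxRecDepth 8000 in
lemma pvLookup_items : pvLookup.items = pvBidir pvLangs := by decide

lemma pvLen_lower (s : String) : PySem.Str.len (PySem.Str.lower s) = PySem.Str.len s := by
  simp [PySem.Str.len_eq, PySem.Str.toList_lower, PySem.Chars.lower]

-- A's scan (keyed by the string's own length) equals first-match lookup in the
-- bidirectional list, given that ids have length 2 and names do not.
lemma pvLoop_eq (low : String) (ps : List (String × String))
    (h : ∀ p ∈ ps, PySem.Str.len p.1 = 2 ∧ PySem.Str.len p.2 ≠ 2) :
    pvLoopA low (PySem.Str.len low) ps
      = Option.map Prod.snd ((pvBidir ps).find? (fun p => p.1 == low)) := by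
  induction ps with
  | nil => rfl
  | cons p rest ih =>
    obtain ⟨i, nm⟩ := p
    have hi2 : PySem.Str.len i = 2 := (h _ (List.mem_cons_self)).1
    have hn2 : PySem.Str.len nm ≠ 2 := (h _ (List.mem_cons_self)).2
    have hrest := ih (fun q hq => h q (List.mem_cons_of_mem _ hq))
    by_cases h1 : low = i
    · subst h1
      simp [pvLoopA, pvBidir, PySem.Str.len_eq] at hi2 ⊢
      simp [hi2]
    · by_cases h2 : low = nm
      · subst h2
        have hi' : (i == low) = false := beq_eq_false_iff_ne.mpr (fun hh => h1 hh.symm)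
        simp [PySem.Str.len_eq] at hn2
        simp only [pvLoopA, pvBidir, List.find?, hi', beq_self_eq_true]
        simp [hn2]
      · have hi' : (i == low) = false := beq_eq_false_iff_ne.mpr (fun hh => h1 hh.symm)
        have hn' : (nm == low) = false := beq_eq_false_iff_ne.mpr (fun hh => h2 hh.symm)
        simp only [pvLoopA, pvBidir, List.find?, hi', hn']
        simp [h1, h2] at hrest ⊢
        exact hrest

-- ===== VERDICT (by name: the statement is the Claim_ definition above) =====
theorem get_lang_spec : Claim_equal_get_lang := by
  intro language _
  unfold Spec_get_lang get_lang get_lang_alt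
  rw [← pvLen_lower language, pvLoop_eq _ _ (by decide)]
  simp [PySem.Dict.get?, pvLookup_items]
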